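-- pv_equiv track=rewrite | github.com/omarelsewify/Projects | CS106A Programming Methodology/section5/string_parsing.py | parse_backwards_hashtags
-- ===== SOURCE A (Python) =====
-- def parse_backwards_hashtags(s):
--     """
--     >>> parse_backwards_hashtags('Check out how hip# I am!!#. Tell the 106A students# good luck!# on their quiz#')
--     ['hip#', 'am!!#', 'students#', 'luck!#', 'quiz#']
--     """
--     tags = []
--     search = 0
--     while search < len(s):
--         end = s.find('#', search)
--         if end == -1:
--             break
--         start = end - 1
--         while start >= 0 and (s[start].isalpha() or s[start] == '!'):
--             start -= 1
--         tag = s[start+1:end+1]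
--         if len(tag) >= 1:
--             tags.append(tag)
--         search = end + 1
--     return tags
-- ===== SOURCE B (Python) =====
-- def parse_backwards_hashtags(s):
--     """Single forward pass: keep a running buffer of the current alpha/'!' run;
--     on '#' emit buffer+'#' and reset; on any other character reset."""
--     tags = []
--     buf = ''
--     for ch in s:
--         if ch == '#':
--             tags.append(buf + '#')
--             buf = ''
--         elif ch.isalpha() or ch == '!':
--             buf += ch
--         else:
--             buf = ''
--     return tags
-- ===== Notes on version B (the rewrite author's own statement) =====
-- stated objective: simpler
-- what changed: Replaces the repeated find('#') plus backward index scan and slicing with one forward pass that maintains the current alpha/'!' run in a buffer and emits buffer+'#' at each '#'.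
import Mathlib
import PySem

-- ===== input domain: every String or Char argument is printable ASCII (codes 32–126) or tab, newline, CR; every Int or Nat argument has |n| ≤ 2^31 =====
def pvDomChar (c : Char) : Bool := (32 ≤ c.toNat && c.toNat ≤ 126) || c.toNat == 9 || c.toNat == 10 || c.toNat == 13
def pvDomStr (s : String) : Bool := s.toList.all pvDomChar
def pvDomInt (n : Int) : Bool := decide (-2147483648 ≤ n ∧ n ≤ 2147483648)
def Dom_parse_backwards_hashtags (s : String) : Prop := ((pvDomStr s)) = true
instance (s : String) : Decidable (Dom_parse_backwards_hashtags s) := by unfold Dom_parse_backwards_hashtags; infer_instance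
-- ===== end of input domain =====

-- B replaces A's repeated find('#') + backward scan + slice with one forward
-- buffered pass (objective: simpler); return values proved equal on every input.

-- ===== PORT A =====
-- the inner 'while start >= 0 and (s[start].isalpha() or s[start] == "!"): start -= 1'
-- (pyGet? returning none would be Python's IndexError; unreachable here since start < len(s))
def pbhBack (cs : List Char) (start : Int) : Int :=
  if h : 0 ≤ start then
    match PySem.List.pyGet? cs start with
    | some c => if PySem.Chars.isalpha c || c = '!' then pbhBack cs (start - 1) else start
    | none => start
  else start
termination_by (start + 1).toNat
decreasing_by omega

-- the outer 'while search < len(s)' loop; fuel bounds the iteration count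
-- (each pass sets search to end+1 > search, so len(s)+1 fuel is never exhausted)
def pbhLoopA (cs : List Char) (fuel : Nat) (search : Int) (tags : List String) : List String :=
  match fuel with
  | 0 => tags
  | fuel + 1 =>
    if search < (cs.length : Int) then
      let e := PySem.Chars.findFrom cs ['#'] search none
      if e = -1 then tags
      else
        let start := pbhBack cs (e - 1)
        let tag := PySem.List.slice cs (some (start + 1)) (some (e + 1))
        pbhLoopA cs fuel (e + 1) (if 1 ≤ tag.length then tags ++ [String.mk tag] else tags)
    else tags

def parse_backwards_hashtags (s : String) : List String :=
  pbhLoopA s.toList (s.toList.length + 1) 0 []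

-- ===== PORT B =====
-- 'for ch in s' with the running buffer buf and the result list tags
def pbhLoopB (cs : List Char) (buf : List Char) (tags : List String) : List String :=
  match cs with
  | [] => tags
  | c :: rest =>
    if c = '#' then pbhLoopB rest [] (tags ++ [String.mk (buf ++ ['#'])])
    else if PySem.Chars.isalpha c || c = '!' then pbhLoopB rest (buf ++ [c]) tags
    else pbhLoopB rest [] tags

def parse_backwards_hashtags_alt (s : String) : List String :=
  pbhLoopB s.toList [] []

-- ===== PRECONDITION & SPEC =====
def Spec_parse_backwards_hashtags (s : String) (out : List String) : Prop := out = parse_backwards_hashtags_alt s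
instance (s : String) (out : List String) : Decidable (Spec_parse_backwards_hashtags s out) := by unfold Spec_parse_backwards_hashtags; infer_instance

-- ===== CLAIM (what is proved, stated in full; the proofs are below) =====
def Claim_equal_parse_backwards_hashtags : Prop := ∀ (s : String), Dom_parse_backwards_hashtags s → Spec_parse_backwards_hashtags s (parse_backwards_hashtags s)

-- ===== LEMMAS AND PROOFS =====

-- a character the backward scan walks over / the buffer keeps
def pbhGood (c : Char) : Bool := PySem.Chars.isalpha c || c = '!'

-- the trailing run of good characters of a list
def pbhGsuf (l : List Char) : List Char := l.rtakeWhile pbhGood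

-- reference recursion: B's loop without the accumulators
def pbhGo : List Char → List Char → List String
  | [], _ => []
  | c :: rest, buf =>
    if c = '#' then String.mk (buf ++ ['#']) :: pbhGo rest []
    else if pbhGood c then pbhGo rest (buf ++ [c])
    else pbhGo rest []

theorem pbhLoopB_eq_go (cs buf : List Char) (tags : List String) :
    pbhLoopB cs buf tags = tags ++ pbhGo cs buf := by
  induction cs generalizing buf tags with
  | nil => simp [pbhLoopB, pbhGo]
  | cons c rest ih =>
    by_cases h : c = '#'
    · simp [pbhLoopB, pbhGo, h, ih]
    · by_cases hg : (PySem.Chars.isalpha c || c = '!') = true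
      · simp [pbhLoopB, pbhGo, pbhGood, h, hg, ih]
      · simp [pbhLoopB, pbhGo, pbhGood, h, hg, ih]

theorem pbhGood_hash : pbhGood '#' = false := by decide

theorem pbhGsuf_of_all (l : List Char) (h : ∀ x ∈ l, pbhGood x) : pbhGsuf l = l :=
  List.rtakeWhile_eq_self_iff.mpr h

theorem pbhTakeWhile_stop (p : Char → Bool) (c : Char) (hc : p c = false) :
    ∀ (a b : List Char), (a ++ c :: b).takeWhile p = a.takeWhile p := by
  intro a
  induction a with
  | nil => intro b; simp [hc]
  | cons x a ih =>
    intro b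
    by_cases hx : p x <;> simp [hx, ih]

theorem pbhGsuf_append_notgood (l y : List Char) (c : Char) (hc : pbhGood c = false) :
    pbhGsuf (l ++ c :: y) = pbhGsuf y := by
  unfold pbhGsuf
  rw [List.rtakeWhile, List.rtakeWhile, List.reverse_append, List.reverse_cons,
    List.append_assoc, List.singleton_append, pbhTakeWhile_stop pbhGood c hc]

theorem pbhGsuf_append_singleton (l : List Char) (c : Char) :
    pbhGsuf (l ++ [c]) = if pbhGood c then pbhGsuf l ++ [c] else [] := by
  unfold pbhGsuf
  rw [List.rtakeWhile_concat]

theorem pbhGsuf_length_le_take (d : List Char) (j : Nat) (hj : j ≤ d.length) :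
    (pbhGsuf (d.take j)).length ≤ j := by
  have := (List.rtakeWhile_suffix (p := pbhGood) (l := d.take j)).length_le
  simpa [Nat.min_eq_left hj] using this

theorem pbhGo_no_hash (l : List Char) (buf : List Char) (h : '#' ∉ l) : pbhGo l buf = [] := by
  induction l generalizing buf with
  | nil => rfl
  | cons c rest ih =>
    have hc : ¬ c = '#' := fun he => h (he ▸ List.mem_cons_self)
    by_cases hg : pbhGood c = true <;>
      simp [pbhGo, hc, hg, ih _ (fun hm => h (List.mem_cons_of_mem _ hm))]

theorem pbhGo_split (p rest buf : List Char) (hp : '#' ∉ p) (hb : ∀ x ∈ buf, pbhGood x) :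
    pbhGo (p ++ '#' :: rest) buf
      = String.mk (pbhGsuf (buf ++ p) ++ ['#']) :: pbhGo rest [] := by
  induction p generalizing buf with
  | nil => simp [pbhGo, pbhGsuf_of_all buf hb]
  | cons c p ih =>
    have hc : ¬ c = '#' := fun he => hp (he ▸ List.mem_cons_self)
    by_cases hg : pbhGood c = true
    · have hb' : ∀ x ∈ buf ++ [c], pbhGood x := by
        intro x hx
        rcases List.mem_append.mp hx with hx | hx
        · exact hb x hx
        · simpa [List.mem_singleton.mp hx] using hg
      have hthis := ih (buf ++ [c]) (fun hm => hp (List.mem_cons_of_mem _ hm)) hb'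
      simp [pbhGo, hc, hg, hthis]
    · have hcg : pbhGood c = false := by simpa using hg
      have hthis := ih [] (fun hm => hp (List.mem_cons_of_mem _ hm)) (by intro x hx; simp at hx)
      simp only [List.cons_append, pbhGo, if_neg hc, if_neg hg, List.nil_append] at hthis ⊢
      rw [hthis, pbhGsuf_append_notgood buf p c hcg]

theorem pbhBack_eq_aux (cs : List Char) :
    ∀ (n : Nat) (i : Int), (i + 1).toNat = n → -1 ≤ i → i < cs.length →
      pbhBack cs i = i - ((pbhGsuf (cs.take (i + 1).toNat)).length : Int) := by
  intro n
  induction n with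
  | zero =>
    intro i hn h0 h1
    have : i = -1 := by omega
    subst this
    rw [pbhBack]
    simp [pbhGsuf, List.rtakeWhile]
  | succ n ih =>
    intro i hn h0 h1
    have hi : 0 ≤ i := by omega
    rw [pbhBack, dif_pos hi, PySem.List.pyGet?_eq_some_getElem cs hi h1]
    dsimp only
    have htake : cs.take (i + 1).toNat = cs.take i.toNat ++ [cs[i.toNat]] := by
      have h2 : (i + 1).toNat = i.toNat + 1 := by omega
      rw [h2, List.take_add_one]
      congr 1
      rw [List.getElem?_eq_getElem (by omega)]
      rfl
    by_cases hg : (PySem.Chars.isalpha cs[i.toNat] || cs[i.toNat] = '!') = true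
    · rw [if_pos hg]
      have hrec := ih (i - 1) (by omega) (by omega) (by omega)
      rw [hrec]
      have h3 : (i - 1 + 1).toNat = i.toNat := by omega
      rw [h3, htake, pbhGsuf_append_singleton]
      rw [if_pos (by simpa [pbhGood] using hg)]
      simp only [List.length_append, List.length_cons, List.length_nil]
      push_cast
      ring
    · rw [if_neg hg]
      rw [htake, pbhGsuf_append_singleton, if_neg (by simpa [pbhGood] using hg)]
      simp

theorem pbhBack_eq (cs : List Char) (i : Int) (h0 : -1 ≤ i) (h1 : i < cs.length) :
    pbhBack cs i = i - ((pbhGsuf (cs.take (i + 1).toNat)).length : Int) :=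
  pbhBack_eq_aux cs (i + 1).toNat i rfl h0 h1

theorem pbhLoopA_eq (cs : List Char) :
    ∀ (fuel k : Nat) (tags : List String), k ≤ cs.length → cs.length + 1 - k ≤ fuel →
    (k = 0 ∨ cs[k - 1]? = some '#') →
    pbhLoopA cs fuel (k : Int) tags = tags ++ pbhGo (cs.drop k) [] := by
  intro fuel
  induction fuel with
  | zero => intro k tags hk hf hb; omega
  | succ fuel ih =>
    intro k tags hk hf hb
    by_cases hkl : k < cs.length
    case neg =>
      have hke : k = cs.length := by omega
      rw [pbhLoopA, if_neg (by exact_mod_cast not_lt.mpr (le_of_eq hke.symm)), hke]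
      simp [pbhGo]
    case pos =>
      simp only [pbhLoopA]
      rw [if_pos (by exact_mod_cast hkl),
        PySem.Chars.findFrom_natCast cs ['#'] k (le_of_lt hkl)]
      set d := cs.drop k with hd
      by_cases hfind : PySem.Chars.find d ['#'] = -1
      · rw [if_pos hfind]
        have hnot : '#' ∉ d := by
          intro hm
          exact ((PySem.Chars.find_eq_neg_one_iff d ['#']).mp hfind)
            ((List.singleton_infix_iff '#' d).mpr hm)
        rw [pbhGo_no_hash d [] hnot, List.append_nil]
        simp
      · rw [if_neg hfind]
        have hge : 0 ≤ PySem.Chars.find d ['#'] := by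
          have := PySem.Chars.neg_one_le_find d ['#']
          omega
        obtain ⟨hpre, hmin⟩ := PySem.Chars.find_spec (s := d) (sub := ['#']) hge
        set j := (PySem.Chars.find d ['#']).toNat with hj
        have hfj : PySem.Chars.find d ['#'] = (j : Int) := by omega
        have hjlt : j < d.length := by
          rcases hpre with ⟨t, ht⟩
          by_contra hcon
          rw [List.drop_eq_nil_of_le (by omega)] at ht
          simp at ht
        have hdj : d[j] = '#' := by
          rcases hpre with ⟨t, ht⟩
          rw [List.drop_eq_getElem_cons hjlt] at ht
          exact (List.cons.injEq _ _ _ _ ▸ ht).1.symm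
        have hdrop : d.drop j = '#' :: d.drop (j + 1) := by
          rw [List.drop_eq_getElem_cons hjlt, hdj]
        have hnp : '#' ∉ d.take j := by
          intro hmem
          obtain ⟨i, hi, hieq⟩ := List.mem_take_iff_getElem.mp hmem
          have hij : i < j := by omega
          exact hmin i hij ⟨d.drop (i + 1), by
            rw [List.singleton_append, ← hieq, ← List.drop_eq_getElem_cons (by omega)]⟩
        have hcs : cs = cs.take k ++ d := (List.take_append_drop k cs).symm
        have hlen : cs.length = k + d.length := by
          conv_lhs => rw [hcs]
          simp [Nat.min_eq_left (le_of_lt hkl)]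
        have hne : ¬ ((k : Int) + (j : Int) = -1) := by omega
        rw [hfj, if_neg hne]
        -- the backward scan
        have hback := pbhBack_eq cs ((k : Int) + (j : Int) - 1) (by omega)
          (by push_cast [hlen]; omega)
        have htoN : ((k : Int) + (j : Int) - 1 + 1).toNat = k + j := by omega
        rw [htoN] at hback
        have htake : cs.take (k + j) = cs.take k ++ d.take j := by
          conv_lhs => rw [hcs]
          rw [List.take_append]
          congr 1
          · rw [List.take_take, Nat.min_eq_right (by omega)]
          · congr 1
            simp [Nat.min_eq_left (le_of_lt hkl)]
        have hgsuf_take : pbhGsuf (cs.take (k + j)) = pbhGsuf (d.take j) := by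
          by_cases hk0 : k = 0
          · rw [htake, hk0]
            simp
          · rcases hb with h0 | hlast
            · exact absurd h0 hk0
            · have hks : cs.take k = cs.take (k - 1) ++ ['#'] := by
                have h2 : k = (k - 1) + 1 := by omega
                conv_lhs => rw [h2]
                rw [List.take_add_one, hlast]
                rfl
              rw [htake, hks, List.append_assoc, List.singleton_append,
                pbhGsuf_append_notgood _ _ _ pbhGood_hash]
        set g := pbhGsuf (d.take j) with hg
        have htle : g.length ≤ j := pbhGsuf_length_le_take d j (le_of_lt hjlt)
        rw [hback, hgsuf_take]
        -- the slice
        have hcast1 : (k : Int) + (j : Int) - 1 - (g.length : Int) + 1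
            = ((k + j - g.length : Nat) : Int) := by push_cast; omega
        have hcast2 : (k : Int) + (j : Int) + 1 = ((k + j + 1 : Nat) : Int) := by push_cast; ring
        rw [hcast1, hcast2, PySem.List.slice_natCast cs (k + j - g.length) (k + j + 1)]
        have hdecomp : d.take j = (d.take j).rdropWhile pbhGood ++ g :=
          List.rdropWhile_append_rtakeWhile.symm
        have hlena : ((d.take j).rdropWhile pbhGood).length = j - g.length := by
          have := congrArg List.length hdecomp
          simp only [List.length_append] at this
          have hjl : (d.take j).length = j := by simp [Nat.min_eq_left (le_of_lt hjlt)]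
          omega
        have hcs2 : cs = (cs.take k ++ (d.take j).rdropWhile pbhGood)
            ++ (g ++ '#' :: d.drop (j + 1)) := by
          conv_lhs => rw [hcs]
          conv_lhs => rw [← List.take_append_drop j d]
          rw [hdrop]
          conv_lhs => rw [hdecomp]
          simp [List.append_assoc]
        have hlenpre : (cs.take k ++ (d.take j).rdropWhile pbhGood).length = k + j - g.length := by
          simp only [List.length_append, hlena]
          simp [Nat.min_eq_left (le_of_lt hkl)]
          omega
        have hdropslice : cs.drop (k + j - g.length) = g ++ '#' :: d.drop (j + 1) := by
          conv_lhs => rw [hcs2]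
          rw [← hlenpre, List.drop_left]
        rw [hdropslice]
        have htag : (g ++ '#' :: d.drop (j + 1)).take (k + j + 1 - (k + j - g.length))
            = g ++ ['#'] := by
          have harith : k + j + 1 - (k + j - g.length) = g.length + 1 := by omega
          rw [harith, List.take_append, List.take_of_length_le (by omega)]
          congr 1
          rw [Nat.add_sub_cancel_left]
          simp
        rw [htag]
        rw [if_pos (by simp)]
        -- the recursive call
        have hb' : k + j + 1 = 0 ∨ cs[k + j + 1 - 1]? = some '#' := by
          right
          have h2 : k + j + 1 - 1 = k + j := by omega
          rw [h2]
          conv_lhs => rw [hcs]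
          rw [List.getElem?_append_right (by simp [Nat.min_eq_left (le_of_lt hkl)])]
          have h3 : k + j - (cs.take k).length = j := by
            simp [Nat.min_eq_left (le_of_lt hkl)]
          rw [h3, List.getElem?_eq_getElem hjlt, hdj]
        rw [ih (k + j + 1) _ (by omega) (by omega) hb']
        have hdrop2 : cs.drop (k + j + 1) = d.drop (j + 1) := by
          rw [hd, List.drop_drop]
          congr 1
        rw [hdrop2]
        -- assemble the right-hand side
        have hsplit : pbhGo d [] = String.mk (g ++ ['#']) :: pbhGo (d.drop (j + 1)) [] := by
          conv_lhs => rw [← List.take_append_drop j d, hdrop]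
          rw [pbhGo_split (d.take j) (d.drop (j + 1)) [] hnp (by intro x hx; simp at hx)]
          rw [List.nil_append]
        rw [hsplit, List.append_assoc, List.singleton_append]

-- ===== VERDICT (by name: the statement is the Claim_ definition above) =====
theorem parse_backwards_hashtags_spec : Claim_equal_parse_backwards_hashtags := by
  intro s _
  unfold Spec_parse_backwards_hashtags parse_backwards_hashtags parse_backwards_hashtags_alt
  rw [pbhLoopB_eq_go]
  have := pbhLoopA_eq s.toList (s.toList.length + 1) 0 [] (by omega) (by omega) (Or.inl rfl)
  simpa using this
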